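-- pv_equiv track=rewrite | github.com/mociepka/coveragepy | lab/parser.py | first_all_blanks
-- ===== SOURCE A (Python) =====
-- def blanks(s):
--     """Return the set of positions where s is blank."""
--     return set(i for i, c in enumerate(s) if c == " ")
--
-- def first_all_blanks(ss):
--     """Find the first position that is all blank in the strings ss."""
--     ss = list(ss)
--     blankss = blanks(ss[0])
--     for s in ss[1:]:
--         blankss &= blanks(s)
--     if blankss:
--         return min(blankss)
--     else:
--         return max(len(s) for s in ss)
-- ===== SOURCE B (Python) =====
-- def first_all_blanks(ss):
--     """Find the first position that is all blank in the strings ss."""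
--     ss = list(ss)
--     width = len(ss[0])
--     for s in ss[1:]:
--         width = min(width, len(s))
--     for c in range(width):
--         if all(s[c] == " " for s in ss):
--             return c
--     return max(len(s) for s in ss)
-- ===== Notes on version B (the rewrite author's own statement) =====
-- stated objective: faster
-- what changed: Replaces building and intersecting per-string blank-position sets with a direct column-major sweep: compute the minimum width, return the first column where every string has a space, else the maximum length.
import Mathlib
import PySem

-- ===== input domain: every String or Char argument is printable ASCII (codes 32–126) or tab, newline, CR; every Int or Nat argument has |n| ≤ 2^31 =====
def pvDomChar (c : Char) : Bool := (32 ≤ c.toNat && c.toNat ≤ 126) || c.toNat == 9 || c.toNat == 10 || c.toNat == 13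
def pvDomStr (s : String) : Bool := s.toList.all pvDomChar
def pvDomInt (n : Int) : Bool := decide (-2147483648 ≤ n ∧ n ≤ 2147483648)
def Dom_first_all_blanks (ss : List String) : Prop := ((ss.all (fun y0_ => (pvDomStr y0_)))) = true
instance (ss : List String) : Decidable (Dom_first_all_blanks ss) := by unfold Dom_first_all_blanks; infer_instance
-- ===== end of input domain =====

-- B replaces A's blank-position set intersections with a column-major sweep over the minimum width (simpler, no auxiliary sets).

-- ===== PORT A =====
-- blanks(s): the set of positions where s is blank
def pvBlanks (s : String) : PySem.Set Int :=
  PySem.Set.ofList (((PySem.List.enumerate s.toList 0).filter (fun p => p.2 == ' ')).map (fun p => p.1))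

def first_all_blanks (ss : List String) : Int :=
  match ss with
  | [] => 0   -- ss[0] raises IndexError in Python; excluded by Pre_
  | s0 :: rest =>
    let blankss := rest.foldl (fun acc s => PySem.Set.inter acc (pvBlanks s)) (pvBlanks s0)
    if !blankss.isEmpty then
      (PySem.List.min? blankss (fun x => x)).getD 0
    else
      (PySem.List.max? ((s0 :: rest).map (fun s => PySem.Str.len s)) (fun x => x)).getD 0

-- ===== PORT B =====
def first_all_blanks_alt (ss : List String) : Int :=
  match ss with
  | [] => 0   -- len(ss[0]) raises IndexError in Python; excluded by Pre_
  | s0 :: rest =>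
    let width := rest.foldl (fun w s => min w (PySem.Str.len s)) (PySem.Str.len s0)
    match (PySem.List.pyRange 0 width 1).find?
        (fun c => (s0 :: rest).all (fun s => PySem.Str.pyGet? s c == some ' ')) with
    | some c => c
    | none => (PySem.List.max? ((s0 :: rest).map (fun s => PySem.Str.len s)) (fun x => x)).getD 0

-- ===== PRECONDITION & SPEC =====
-- Pre_ excludes only the empty list, where A (ss[0]) raises IndexError.
def Pre_first_all_blanks (ss : List String) : Prop := ss ≠ []
instance (ss : List String) : Decidable (Pre_first_all_blanks ss) := by unfold Pre_first_all_blanks; infer_instance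
def pvWitness_first_all_blanks : List String := [" ab", " xy"]

def Spec_first_all_blanks (ss : List String) (out : Int) : Prop := out = first_all_blanks_alt ss
instance (ss : List String) (out : Int) : Decidable (Spec_first_all_blanks ss out) := by unfold Spec_first_all_blanks; infer_instance

-- ===== CLAIM (what is proved, stated in full; the proofs are below) =====
def Claim_equal_first_all_blanks : Prop := ∀ (ss : List String), Dom_first_all_blanks ss → Pre_first_all_blanks ss → Spec_first_all_blanks ss (first_all_blanks ss)

-- ===== LEMMAS AND PROOFS =====

-- membership in blanks(s)
theorem mem_pvBlanks (s : String) (i : Int) :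
    i ∈ pvBlanks s ↔ 0 ≤ i ∧ s.toList[i.toNat]? = some ' ' := by
  unfold pvBlanks
  rw [PySem.Set.mem_ofList]
  simp only [List.mem_map, List.mem_filter, PySem.List.mem_enumerate_iff, beq_iff_eq]
  constructor
  · rintro ⟨p, ⟨⟨k, hk, rfl⟩, hsp⟩, rfl⟩
    simp only at hsp ⊢
    refine ⟨by positivity, ?_⟩
    have h1 : ((0 : Int) + ↑k).toNat = k := by omega
    rw [h1, List.getElem?_eq_getElem hk, hsp]
  · rintro ⟨h0, hget⟩
    have hk : i.toNat < s.toList.length := by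
      rcases List.getElem?_eq_some_iff.mp hget with ⟨h, _⟩
      exact h
    refine ⟨(↑i.toNat, s.toList[i.toNat]), ⟨⟨i.toNat, hk, by simp [h0]⟩, ?_⟩, by omega⟩
    simpa [List.getElem?_eq_getElem hk] using hget

-- membership in the folded intersection
theorem mem_foldl_inter (rest : List String) (acc : PySem.Set Int) (i : Int) :
    i ∈ rest.foldl (fun acc s => PySem.Set.inter acc (pvBlanks s)) acc ↔
      i ∈ acc ∧ ∀ s ∈ rest, i ∈ pvBlanks s := by
  induction rest generalizing acc with
  | nil => simp
  | cons s t ih =>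
    simp only [List.foldl_cons, ih, PySem.Set.mem_inter, List.mem_cons]
    constructor
    · rintro ⟨⟨h1, h2⟩, h3⟩
      exact ⟨h1, by rintro x (rfl | hx) <;> [exact h2; exact h3 x hx]⟩
    · rintro ⟨h1, h2⟩
      exact ⟨⟨h1, h2 s (Or.inl rfl)⟩, fun x hx => h2 x (Or.inr hx)⟩

-- the fold of min bounds
theorem lt_foldl_min (rest : List String) (a i : Int) :
    i < rest.foldl (fun w s => min w (PySem.Str.len s)) a ↔
      i < a ∧ ∀ s ∈ rest, i < PySem.Str.len s := by
  induction rest generalizing a with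
  | nil => simp
  | cons s t ih =>
    simp only [List.foldl_cons, ih, lt_min_iff, List.mem_cons]
    constructor
    · rintro ⟨⟨h1, h2⟩, h3⟩
      exact ⟨h1, by rintro x (rfl | hx) <;> [exact h2; exact h3 x hx]⟩
    · rintro ⟨h1, h2⟩
      exact ⟨⟨h1, h2 s (Or.inl rfl)⟩, fun x hx => h2 x (Or.inr hx)⟩

-- find? on a strictly increasing list returns a lower bound among satisfiers
theorem find?_min_of_pairwise {p : Int → Bool} {l : List Int} (hp : l.Pairwise (· < ·))
    {c : Int} (h : l.find? p = some c) : ∀ y ∈ l, p y → c ≤ y := by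
  induction l with
  | nil => simp at h
  | cons x t ih =>
    rw [List.find?_cons] at h
    rcases hx : p x with _ | _
    · rw [hx] at h
      intro y hy hpy
      rcases List.mem_cons.mp hy with rfl | hyt
      · simp [hpy] at hx
      · exact ih hp.of_cons h y hyt hpy
    · rw [hx] at h
      injection h with h; subst h
      intro y hy _
      rcases List.mem_cons.mp hy with rfl | hyt
      · exact le_refl _
      · exact le_of_lt (List.rel_of_pairwise_cons hp hyt)

-- membership in A's intersected set, phrased as B's column test
theorem pvBlanks_all_iff (s0 : String) (rest : List String) (i : Int) :
    i ∈ rest.foldl (fun acc s => PySem.Set.inter acc (pvBlanks s)) (pvBlanks s0) ↔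
      0 ≤ i ∧ (((s0 :: rest).all fun s => PySem.Str.pyGet? s i == some ' ') = true) := by
  rw [mem_foldl_inter, mem_pvBlanks]
  simp only [List.all_cons, List.all_eq_true, Bool.and_eq_true, beq_iff_eq,
    PySem.Str.pyGet?_eq, PySem.Chars.pyGet?]
  constructor
  · rintro ⟨⟨h0, hs0⟩, hrest⟩
    refine ⟨h0, ?_, ?_⟩
    · rw [PySem.List.pyGet?_of_nonneg _ h0]; exact hs0
    · intro s hs
      rw [PySem.List.pyGet?_of_nonneg _ h0]
      exact ((mem_pvBlanks s i).mp (hrest s hs)).2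
  · rintro ⟨h0, hs0, hrest⟩
    rw [PySem.List.pyGet?_of_nonneg _ h0] at hs0
    refine ⟨⟨h0, hs0⟩, fun s hs => (mem_pvBlanks s i).mpr ⟨h0, ?_⟩⟩
    have := hrest s hs
    rwa [PySem.List.pyGet?_of_nonneg _ h0] at this

-- a member of the intersected set lies below the minimum width
theorem mem_lt_width (s0 : String) (rest : List String) (i : Int)
    (hi : i ∈ rest.foldl (fun acc s => PySem.Set.inter acc (pvBlanks s)) (pvBlanks s0)) :
    i < rest.foldl (fun w s => min w (PySem.Str.len s)) (PySem.Str.len s0) := by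
  rw [mem_foldl_inter, mem_pvBlanks] at hi
  obtain ⟨⟨h0, hs0⟩, hrest⟩ := hi
  have hb : ∀ s : String, s.toList[i.toNat]? = some ' ' → i < PySem.Str.len s := by
    intro s hg
    rcases List.getElem?_eq_some_iff.mp hg with ⟨h, _⟩
    have : PySem.Str.len s = (s.toList.length : Int) := by simp [pysem]
    omega
  rw [lt_foldl_min]
  exact ⟨hb s0 hs0, fun s hs => hb s ((mem_pvBlanks s i).mp (hrest s hs)).2⟩

-- ===== VERDICT (by name: the statement is the Claim_ definition above) =====
theorem first_all_blanks_spec : Claim_equal_first_all_blanks := by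
  intro ss _ hpre
  unfold Spec_first_all_blanks
  match ss with
  | [] => exact absurd rfl hpre
  | s0 :: rest =>
    simp only [first_all_blanks, first_all_blanks_alt]
    split
    next hne =>
      -- A's intersection is nonempty: its min is B's first all-blank column
      have hne' : rest.foldl (fun acc s => PySem.Set.inter acc (pvBlanks s)) (pvBlanks s0) ≠ [] := by
        intro h; rw [h] at hne; simp at hne
      rcases hmin : PySem.List.min?
          (rest.foldl (fun acc s => PySem.Set.inter acc (pvBlanks s)) (pvBlanks s0)) (fun x => x)
        with _ | m
      · exact absurd ((PySem.List.min?_eq_none_iff _ _).mp hmin) hne'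
      have hmmem := PySem.List.min?_mem hmin
      have hm := (pvBlanks_all_iff s0 rest m).mp hmmem
      have hmrange : m ∈ PySem.List.pyRange 0
          (rest.foldl (fun w s => min w (PySem.Str.len s)) (PySem.Str.len s0)) 1 := by
        rw [PySem.List.mem_pyRange_one]
        exact ⟨hm.1, mem_lt_width s0 rest m hmmem⟩
      split
      next c hfind =>
        have hcp := List.find?_some hfind
        have hcmem := List.mem_of_find?_eq_some hfind
        have hcB : c ∈ rest.foldl (fun acc s => PySem.Set.inter acc (pvBlanks s)) (pvBlanks s0) :=
          (pvBlanks_all_iff s0 rest c).mpr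
            ⟨(PySem.List.mem_pyRange_one.mp hcmem).1, hcp⟩
        have hmle : m ≤ c := PySem.List.min?_isMin hmin c hcB
        have hcle : c ≤ m :=
          find?_min_of_pairwise (PySem.List.pairwise_lt_pyRange_one 0 _) hfind m hmrange hm.2
        simp only [Option.getD_some]
        exact le_antisymm hmle hcle
      next hfind =>
        rw [List.find?_eq_none] at hfind
        exact absurd hm.2 (by simpa using hfind m hmrange)
    next hemp =>
      -- A's intersection is empty: no column passes B's test, both take the max branch
      have hempty : rest.foldl (fun acc s => PySem.Set.inter acc (pvBlanks s)) (pvBlanks s0) = [] := by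
        rcases h : rest.foldl (fun acc s => PySem.Set.inter acc (pvBlanks s)) (pvBlanks s0) with _ | ⟨x, t⟩
        · rfl
        · rw [h] at hemp; simp at hemp
      split
      next c hfind =>
        have hcp := List.find?_some hfind
        have hcmem := List.mem_of_find?_eq_some hfind
        have hcB : c ∈ rest.foldl (fun acc s => PySem.Set.inter acc (pvBlanks s)) (pvBlanks s0) :=
          (pvBlanks_all_iff s0 rest c).mpr
            ⟨(PySem.List.mem_pyRange_one.mp hcmem).1, hcp⟩
        rw [hempty] at hcB
        simp at hcB
      next hfind => rfl
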